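-- pv_equiv track=rewrite | github.com/alecramsay/T | t/commands.py | unwrap_args
-- ===== SOURCE A (Python) =====
-- def unwrap_args(tokens) -> list[str]:
--     """Remove extraneous parentheses that simply surround arguments or argument with 'or' defaults."""
--
--     out_tokens: list[str] = list()
--     pending: list[str] = list()
--
--     in_parens: bool = False
--
--     for token in tokens:
--         if in_parens and token == "(":
--             out_tokens += pending
--             pending = [token]
--             continue
--
--         if in_parens and token == ")":
--             pending += [token]
--             wrapped_decl: bool = False
--             if len(pending) == 3 and pending[1].startswith("args."):
--                 wrapped_decl = True
--             elif (
--                 len(pending) == 5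
--                 and pending[1].startswith("args.")
--                 and pending[2] == "or"
--             ):
--                 wrapped_decl = True
--             if wrapped_decl:
--                 out_tokens += pending[1 : len(pending) - 1]
--             else:
--                 out_tokens += pending
--             pending = list()
--             in_parens = False
--             continue
--
--         if in_parens:
--             pending += [token]
--             continue
--
--         if token == "(":
--             in_parens = True
--             pending += [token]
--             continue
--
--         out_tokens += [token]
--
--     if len(pending) > 0:
--         out_tokens += pending
--
--     return out_tokens
-- ===== SOURCE B (Python) =====
-- def unwrap_args(tokens) -> list[str]:
--     """Remove extraneous parentheses that simply surround arguments or argument with 'or' defaults.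
--
--     Two phases per region: locate the extent of a candidate paren group by
--     look-ahead, then transform the closed group, instead of one interleaved
--     state machine."""
--
--     toks = list(tokens)
--     out: list[str] = []
--     n = len(toks)
--     i = 0
--     while i < n:
--         if toks[i] != "(":
--             out.append(toks[i])
--             i += 1
--             continue
--         # look ahead for the next delimiter after the opening '('
--         j = i + 1
--         while j < n and toks[j] != "(" and toks[j] != ")":
--             j += 1
--         if j == n:
--             # unclosed trailing group: emit verbatim
--             out.extend(toks[i:])
--             break
--         if toks[j] == "(":
--             # another '(' before the close: emit the prefix verbatim, restart there
--             out.extend(toks[i:j])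
--             i = j
--             continue
--         grp = toks[i : j + 1]
--         if len(grp) == 3 and grp[1].startswith("args."):
--             out.extend(grp[1:2])
--         elif len(grp) == 5 and grp[1].startswith("args.") and grp[2] == "or":
--             out.extend(grp[1:4])
--         else:
--             out.extend(grp)
--         i = j + 1
--     return out
-- ===== Notes on version B (the rewrite author's own statement) =====
-- stated objective: alternative
-- what changed: Replaces A's single interleaved state machine (out/pending/in_parens flags mutated per token) with a two-phase index scan: a look-ahead that delimits each paren group first, then a separate transformation of the closed group; trades the pending accumulator for slicing.
import Mathlib
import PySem

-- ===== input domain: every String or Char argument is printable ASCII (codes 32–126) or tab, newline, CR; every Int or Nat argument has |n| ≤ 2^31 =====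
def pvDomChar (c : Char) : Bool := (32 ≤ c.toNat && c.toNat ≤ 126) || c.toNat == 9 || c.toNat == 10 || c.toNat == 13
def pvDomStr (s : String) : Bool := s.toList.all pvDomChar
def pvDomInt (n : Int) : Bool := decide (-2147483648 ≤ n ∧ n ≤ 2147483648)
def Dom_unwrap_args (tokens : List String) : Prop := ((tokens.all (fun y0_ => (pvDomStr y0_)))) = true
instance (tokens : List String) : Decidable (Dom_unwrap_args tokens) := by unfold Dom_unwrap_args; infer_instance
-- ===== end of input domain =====

-- B separates parsing (delimiting each paren group by look-ahead) from transformation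
-- of the closed group, instead of A's interleaved state machine; same output, same cost.

-- ===== PORT A =====
-- state: (out_tokens, (pending, in_parens)); indexing pending[1]/pending[2] is guarded
-- by the length tests exactly as in Python, so getD is exact there.
def pvStepA (st : List String × List String × Bool) (token : String) :
    List String × List String × Bool :=
  let out := st.1; let pending := st.2.1; let in_parens := st.2.2
  if in_parens && token == "(" then
    (out ++ pending, ([token], true))
  else if in_parens && token == ")" then
    let pending := pending ++ [token]
    let wrapped_decl : Bool :=
      if pending.length == 3 && PySem.Str.startswith (pending.getD 1 "") "args." then true
      else if pending.length == 5 && PySem.Str.startswith (pending.getD 1 "") "args."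
              && (pending.getD 2 "" == "or") then true
      else false
    if wrapped_decl then
      (out ++ PySem.List.slice pending (some 1) (some ((pending.length : Int) - 1)), ([], false))
    else (out ++ pending, ([], false))
  else if in_parens then (out, (pending ++ [token], true))
  else if token == "(" then (out, (pending ++ [token], true))
  else (out ++ [token], (pending, in_parens))

def unwrap_args (tokens : List String) : List String :=
  let st := tokens.foldl pvStepA ([], ([], false))
  if st.2.1.length > 0 then st.1 ++ st.2.1 else st.1

-- ===== PORT B =====
-- the inner look-ahead loop of Source B: (tokens before the first delimiter, rest from it)
def pvFindSplit : List String → List String × List String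
  | [] => ([], [])
  | x :: xs =>
    if x == "(" || x == ")" then ([], x :: xs)
    else
      let p := pvFindSplit xs
      (x :: p.1, p.2)

theorem pvFindSplit_append (l : List String) : (pvFindSplit l).1 ++ (pvFindSplit l).2 = l := by
  induction l with
  | nil => rfl
  | cons x xs ih =>
    simp only [pvFindSplit]
    split
    · rfl
    · simpa using ih

-- the outer while loop of Source B, recursing on the remaining tokens
def pvAltGo : List String → List String
  | [] => []
  | t :: rest =>
    if t != "(" then t :: pvAltGo rest
    else
      match h : pvFindSplit rest with
      | (_, []) => t :: rest                 -- unclosed trailing group: verbatim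
      | (inner, d :: after) =>
        if d == "(" then
          (t :: inner) ++ pvAltGo (d :: after)
        else
          let grp := t :: inner ++ [d]
          (if grp.length == 3 && PySem.Str.startswith (grp.getD 1 "") "args." then
              PySem.List.slice grp (some 1) (some 2)
           else if grp.length == 5 && PySem.Str.startswith (grp.getD 1 "") "args."
                   && (grp.getD 2 "" == "or") then
              PySem.List.slice grp (some 1) (some 4)
           else grp) ++ pvAltGo after
termination_by l => l.length
decreasing_by
  · simp
  · have := pvFindSplit_append rest
    rw [h] at this
    simp only [← this, List.length_cons, List.length_append]
    omega
  · have := pvFindSplit_append rest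
    rw [h] at this
    simp only [← this, List.length_cons, List.length_append]
    omega

def unwrap_args_alt (tokens : List String) : List String := pvAltGo tokens

-- ===== PRECONDITION & SPEC =====
def Spec_unwrap_args (tokens : List String) (out : List String) : Prop := out = unwrap_args_alt tokens
instance (tokens : List String) (out : List String) : Decidable (Spec_unwrap_args tokens out) := by unfold Spec_unwrap_args; infer_instance

-- ===== CLAIM (what is proved, stated in full; the proofs are below) =====
def Claim_equal_unwrap_args : Prop := ∀ (tokens : List String), Dom_unwrap_args tokens → Spec_unwrap_args tokens (unwrap_args tokens)

-- ===== LEMMAS AND PROOFS =====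

def pvFinish (st : List String × List String × Bool) : List String :=
  if st.2.1.length > 0 then st.1 ++ st.2.1 else st.1

-- A's wrapped_decl chain + single slice equals B's per-branch slices, on the same group
theorem pvWrap_eq (grp : List String) :
    (if (if (grp.length == 3 && PySem.Str.startswith (grp.getD 1 "") "args.") = true then true
         else if (grp.length == 5 && PySem.Str.startswith (grp.getD 1 "") "args."
                  && (grp.getD 2 "" == "or")) = true then true else false) = true
       then PySem.List.slice grp (some 1) (some ((grp.length : Int) - 1)) else grp)
    = (if (grp.length == 3 && PySem.Str.startswith (grp.getD 1 "") "args.") = true then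
         PySem.List.slice grp (some 1) (some 2)
       else if (grp.length == 5 && PySem.Str.startswith (grp.getD 1 "") "args."
                && (grp.getD 2 "" == "or")) = true then
         PySem.List.slice grp (some 1) (some 4)
       else grp) := by
  by_cases h3 : (grp.length == 3 && PySem.Str.startswith (grp.getD 1 "") "args.") = true
  · have hlen : grp.length = 3 := by
      have := h3; simp only [Bool.and_eq_true, beq_iff_eq] at this; exact this.1
    have hc : (if (grp.length == 3 && PySem.Str.startswith (grp.getD 1 "") "args.") = true then true
        else if (grp.length == 5 && PySem.Str.startswith (grp.getD 1 "") "args."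
                 && (grp.getD 2 "" == "or")) = true then true else false) = true := by
      rw [if_pos h3]
    rw [if_pos hc, if_pos h3, hlen]
    norm_num
  · by_cases h5 : (grp.length == 5 && PySem.Str.startswith (grp.getD 1 "") "args."
                   && (grp.getD 2 "" == "or")) = true
    · have hlen : grp.length = 5 := by
        have := h5; simp only [Bool.and_eq_true, beq_iff_eq] at this; exact this.1.1
      have hc : (if (grp.length == 3 && PySem.Str.startswith (grp.getD 1 "") "args.") = true then true
          else if (grp.length == 5 && PySem.Str.startswith (grp.getD 1 "") "args."
                   && (grp.getD 2 "" == "or")) = true then true else false) = true := by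
        rw [if_neg h3, if_pos h5]
      rw [if_pos hc, if_neg h3, if_pos h5, hlen]
      norm_num
    · have hc : ¬ (if (grp.length == 3 && PySem.Str.startswith (grp.getD 1 "") "args.") = true then true
          else if (grp.length == 5 && PySem.Str.startswith (grp.getD 1 "") "args."
                   && (grp.getD 2 "" == "or")) = true then true else false) = true := by
        rw [if_neg h3, if_neg h5]; simp
      rw [if_neg hc, if_neg h3, if_neg h5]


theorem pvFindSplit_no_delim (inner : List String)
    (hfree : ∀ x ∈ inner, x ≠ "(" ∧ x ≠ ")") (l : List String) :
    pvFindSplit (inner ++ l) = (inner ++ (pvFindSplit l).1, (pvFindSplit l).2) := by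
  induction inner with
  | nil => simp
  | cons x xs ih =>
    have hx := hfree x (by simp)
    simp only [List.cons_append, pvFindSplit]
    rw [if_neg (by simp [hx.1, hx.2]), ih (fun y hy => hfree y (by simp [hy]))]

-- the main invariant: the A-fold, from either of its two reachable state shapes,
-- computes out ++ (B's scan of what remains)
theorem pvLoop_eq (ts : List String) :
    (∀ out, pvFinish (ts.foldl pvStepA (out, ([], false))) = out ++ pvAltGo ts) ∧
    (∀ out inner, (∀ x ∈ inner, x ≠ "(" ∧ x ≠ ")") →
      pvFinish (ts.foldl pvStepA (out, ("(" :: inner, true)))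
        = out ++ pvAltGo ("(" :: (inner ++ ts))) := by
  induction ts with
  | nil =>
    constructor
    · intro out; simp [pvFinish, pvAltGo]
    · intro out inner hfree
      have hsp : pvFindSplit (inner ++ ([] : List String)) = (inner, []) := by
        have := pvFindSplit_no_delim inner hfree []
        simpa [pvFindSplit] using this
      rw [pvAltGo]
      simp only [List.foldl_nil]
      rw [if_neg (by simp)]
      split
      · simp [pvFinish]
      · next _ d after hm =>
          rw [hsp] at hm
          simp at hm
  | cons t ts ih =>
    constructor
    · intro out
      by_cases ht : t = "("
      · subst ht
        have h2 := ih.2 out [] (by simp)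
        simp only [List.foldl_cons, pvStepA, List.nil_append] at h2 ⊢
        simpa using h2
      · rw [pvAltGo, if_pos (by simp [ht])]
        have h1 := ih.1 (out ++ [t])
        simp only [List.foldl_cons, pvStepA] at h1 ⊢
        rw [if_neg (by simp), if_neg (by simp), if_neg (by simp), if_neg (by simp [ht])]
        simpa using h1
    · intro out inner hfree
      by_cases ht : t = "("
      · -- flush pending, restart a group at t
        subst ht
        have h2 := (ih.2 (out ++ ("(" :: inner)) [] (by simp))
        simp only [List.foldl_cons, pvStepA] at h2 ⊢
        rw [if_pos (by simp)]
        rw [pvAltGo, if_neg (by simp)]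
        rw [pvFindSplit_no_delim inner hfree ("(" :: ts)]
        simp only [pvFindSplit]
        rw [if_pos (by simp)]
        simp only [List.nil_append] at h2
        simp [h2]
      · by_cases ht2 : t = ")"
        · -- close the group
          subst ht2
          rw [pvAltGo, if_neg (by simp)]
          rw [pvFindSplit_no_delim inner hfree (")" :: ts)]
          simp only [pvFindSplit]
          split
          · next heq => simp at heq
          · next inner1 d after heq =>
            simp at heq
            obtain ⟨h1, h2, h3⟩ := heq
            subst h1; subst h2; subst h3
            rw [if_neg (by simp)]
            simp only [List.foldl_cons, pvStepA]
            rw [if_neg (by simp), if_pos (by simp)]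
            simp only [List.cons_append]
            rw [← pvWrap_eq ("(" :: (inner ++ [")"]))]
            split
            · simp [ih.1]
            · split
              · simp [ih.1]
              · simp [ih.1]
        · -- ordinary token inside the group: it joins pending/inner
          have h2 := ih.2 out (inner ++ [t])
            (by intro x hx
                rcases (List.mem_append.mp hx) with h | h
                · exact hfree x h
                · simp at h; simp [h, ht, ht2])
          simp only [List.foldl_cons, pvStepA]
          rw [if_neg (by simp [ht]), if_neg (by simp [ht2]), if_pos (by simp)]
          simpa using h2

-- ===== VERDICT (by name: the statement is the Claim_ definition above) =====
theorem unwrap_args_spec : Claim_equal_unwrap_args := by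
  intro tokens _
  show unwrap_args tokens = unwrap_args_alt tokens
  have := (pvLoop_eq tokens).1 []
  simpa [unwrap_args, unwrap_args_alt, pvFinish] using this
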